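-- pv_equiv track=rewrite | github.com/sieukim/algorithm-programmers | level0/ex50.py | solution
-- ===== SOURCE A (Python) =====
-- def solution(age):
--     # 알파벳 개수
--     n = 26
--     # 숫자: 알파벳
--     age_dict = {i: chr(i+ord('a')) for i in range(n)}
--     # 변환 결과
--     result = ''
--
--     while age > 0:
--         age, mod = divmod(age, 10)
--         result = age_dict[mod] + result
--
--     return result
-- ===== SOURCE B (Python) =====
-- def solution(age):
--     if age <= 0:
--         return ''
--     return ''.join(chr(int(d) + ord('a')) for d in str(age))
-- ===== Notes on version B (the rewrite author's own statement) =====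
-- stated objective: idiomatic
-- what changed: Replaces the bottom-up divmod extraction loop (prepending dict-looked-up letters) with a top-down map over the decimal string str(age), shifting each digit character to a letter and joining.
import Mathlib
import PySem

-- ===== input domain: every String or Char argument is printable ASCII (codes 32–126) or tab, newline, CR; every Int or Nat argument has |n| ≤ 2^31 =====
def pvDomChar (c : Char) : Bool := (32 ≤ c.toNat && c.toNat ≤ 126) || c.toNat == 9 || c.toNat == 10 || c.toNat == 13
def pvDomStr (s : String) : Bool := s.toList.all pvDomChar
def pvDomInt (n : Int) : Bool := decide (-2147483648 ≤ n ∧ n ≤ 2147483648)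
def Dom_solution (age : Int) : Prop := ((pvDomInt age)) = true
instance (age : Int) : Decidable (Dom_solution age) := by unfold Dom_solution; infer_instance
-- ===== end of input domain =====

-- B replaces A's bottom-up divmod loop by a top-down map over the decimal string; same values everywhere.

-- ===== PORT A =====
-- age_dict = {i: chr(i+ord('a')) for i in range(26)}
def pvAgeDict : PySem.Dict Int Char :=
  (PySem.List.pyRange 0 26 1).foldl
    (fun d i => PySem.Dict.insert d i (Char.ofNat (i + 97).toNat)) PySem.Dict.empty

-- the while loop; result kept as List Char ('age_dict[mod] + result' = cons).
-- KeyError on age_dict[mod] is impossible (0 ≤ mod < 10 < 26), so the .getD 'a' default is never used.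
def solutionLoop (age : Int) (result : List Char) : List Char :=
  if h : 0 < age then
    solutionLoop (PySem.Int.floordiv age 10)
      (((PySem.Dict.get? pvAgeDict (PySem.Int.mod age 10)).getD 'a') :: result)
  else result
termination_by age.toNat
decreasing_by
  rw [PySem.Int.floordiv_eq_ediv_of_pos (by norm_num : (0:Int) < 10)]
  have h2 : age / 10 < age := by
    have := Int.ediv_le_self 10 (le_of_lt h)
    rcases Int.lt_or_le (age / 10) age with h' | h'
    · exact h'
    · exfalso
      have h10 : (age / 10) * 10 ≤ age := Int.ediv_mul_le age (by norm_num)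
      nlinarith
  have h3 : 0 ≤ age / 10 := Int.ediv_nonneg (le_of_lt h) (by norm_num)
  omega

def solution (age : Int) : String := String.ofList (solutionLoop age [])

-- ===== PORT B =====
-- chr(int(d) + ord('a')) for a decimal digit character d (exact: str(age) for age>0 is digits only)
def pvShift (c : Char) : Char := Char.ofNat (c.toNat - 48 + 97)

def solution_alt (age : Int) : String :=
  if age ≤ 0 then "" else String.ofList ((PySem.Int.toChars age).map pvShift)

-- ===== PRECONDITION & SPEC =====
def Spec_solution (age : Int) (out : String) : Prop := out = solution_alt age
instance (age : Int) (out : String) : Decidable (Spec_solution age out) := by unfold Spec_solution; infer_instance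

-- ===== CLAIM (what is proved, stated in full; the proofs are below) =====
def Claim_equal_solution : Prop := ∀ (age : Int), Dom_solution age → Spec_solution age (solution age)

-- ===== LEMMAS AND PROOFS =====

lemma pv_tdc_append (b fuel n : Nat) (l1 l2 : List Char) :
    Nat.toDigitsCore b fuel n (l1 ++ l2) = Nat.toDigitsCore b fuel n l1 ++ l2 := by
  induction fuel generalizing n l1 with
  | zero => rfl
  | succ f ih =>
    simp only [Nat.toDigitsCore]
    split
    · rfl
    · exact ih (n / b) (Nat.digitChar (n % b) :: l1)

lemma pv_shift_digit (k : Nat) (hk : k < 10) :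
    (PySem.Dict.get? pvAgeDict ((k : Nat) : Int)).getD 'a' = pvShift (Nat.digitChar k) := by
  interval_cases k <;> decide

lemma pv_loop_eq (fuel : Nat) : ∀ (n : Nat), n < fuel → 0 < n → ∀ (res : List Char),
    solutionLoop (n : Int) res = (Nat.toDigitsCore 10 fuel n []).map pvShift ++ res := by
  induction fuel with
  | zero => omega
  | succ f ih =>
    intro n hf hn res
    have hpos : (0 : Int) < (n : Int) := by exact_mod_cast hn
    rw [solutionLoop, dif_pos hpos]
    have hdiv : PySem.Int.floordiv (n : Int) 10 = ((n / 10 : Nat) : Int) := by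
      exact_mod_cast PySem.Int.floordiv_natCast n 10
    have hmod : PySem.Int.mod (n : Int) 10 = ((n % 10 : Nat) : Int) := by
      exact_mod_cast PySem.Int.mod_natCast n 10
    rw [hdiv, hmod, pv_shift_digit (n % 10) (by omega)]
    simp only [Nat.toDigitsCore]
    by_cases h0 : n / 10 = 0
    · rw [if_pos h0, h0]
      rw [solutionLoop]
      norm_num
    · rw [if_neg h0]
      have hlt : n / 10 < f := lt_of_lt_of_le (Nat.div_lt_self hn (by norm_num)) (by omega)
      rw [ih (n / 10) hlt (Nat.pos_of_ne_zero h0)]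
      have : (Nat.digitChar (n % 10) :: ([] : List Char)) = ([] : List Char) ++ [Nat.digitChar (n % 10)] := rfl
      rw [this, pv_tdc_append]
      simp

-- ===== VERDICT (by name: the statement is the Claim_ definition above) =====
theorem solution_spec : Claim_equal_solution := by
  intro age _
  unfold Spec_solution solution solution_alt
  by_cases h : age ≤ 0
  · have hl : solutionLoop age [] = [] := by
      rw [solutionLoop, dif_neg (by omega : ¬ 0 < age)]
    rw [if_pos h, hl]
  · rw [if_neg h]
    have hn : 0 < age.toNat := by omega
    have hage : ((age.toNat : Nat) : Int) = age := Int.toNat_of_nonneg (by omega)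
    have hchars : PySem.Int.toChars age = Nat.toDigits 10 age.toNat := by
      simp [PySem.Int.toChars, show ¬ age < 0 by omega]
    have hl : solutionLoop age [] =
        (Nat.toDigitsCore 10 (age.toNat + 1) age.toNat []).map pvShift ++ [] := by
      conv_lhs => rw [← hage]
      exact pv_loop_eq (age.toNat + 1) age.toNat (by omega) hn []
    rw [hchars, Nat.toDigits, hl, List.append_nil]
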